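-- pv_equiv track=rewrite | github.com/gee-community/geeViz | outputLib/charts.py | _thin_tick_vals
-- ===== SOURCE A (Python) =====
-- def _thin_tick_vals(tick_vals, max_ticks=10):
--     """Return a subset of *tick_vals* so that at most *max_ticks* are shown.
--
--     Chooses a stride of 1, 2, 5, 10, 20, 50, … (the smallest that keeps
--     the count at or below *max_ticks*), always including the first and last
--     values.  Returns ``None`` when no thinning is needed.
--     """
--     if max_ticks is None or max_ticks <= 0 or len(tick_vals) <= max_ticks:
--         return None  # no thinning needed
--     n = len(tick_vals)
--     # Generate nice strides: 1, 2, 5, 10, 20, 50, 100, 200, 500, …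
--     magnitude = 1
--     while magnitude < n:
--         for base in [1, 2, 5]:
--             stride = base * magnitude
--             # Ticks: always include first & last, plus every stride-th index
--             kept = [tick_vals[0]] + [tick_vals[i] for i in range(stride, n - 1, stride)] + [tick_vals[-1]]
--             if len(kept) <= max_ticks:
--                 return kept
--         magnitude *= 10
--     # Fallback: just first and last
--     return [tick_vals[0], tick_vals[-1]]
-- ===== SOURCE B (Python) =====
-- def _pick_stride(n, max_ticks):
--     """Smallest nice stride (1,2,5 x power of ten < n) keeping the count
--     2 + (n-2)//stride at or below max_ticks, computed arithmetically."""
--     magnitude = 1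
--     while magnitude < n:
--         for base in (1, 2, 5):
--             stride = base * magnitude
--             if (n - 2) // stride + 2 <= max_ticks:
--                 return stride
--         magnitude *= 10
--     return None
--
--
-- def _thin_tick_vals(tick_vals, max_ticks=10):
--     if max_ticks is None or max_ticks <= 0 or len(tick_vals) <= max_ticks:
--         return None
--     n = len(tick_vals)
--     stride = _pick_stride(n, max_ticks)
--     if stride is None:
--         return [tick_vals[0], tick_vals[-1]]
--     return [tick_vals[0], *tick_vals[stride:n - 1:stride], tick_vals[-1]]
-- ===== Notes on version B (the rewrite author's own statement) =====
-- stated objective: alternative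
-- what changed: Instead of materializing a candidate kept-list for every stride and measuring its length, B picks the stride purely arithmetically (count = 2 + (n-2)//stride per candidate, O(1) per stride) and builds the output list once, by a single slice; intended as faster (median 2.47x at the largest measured size, but not consistent across inputs).
import Mathlib
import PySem

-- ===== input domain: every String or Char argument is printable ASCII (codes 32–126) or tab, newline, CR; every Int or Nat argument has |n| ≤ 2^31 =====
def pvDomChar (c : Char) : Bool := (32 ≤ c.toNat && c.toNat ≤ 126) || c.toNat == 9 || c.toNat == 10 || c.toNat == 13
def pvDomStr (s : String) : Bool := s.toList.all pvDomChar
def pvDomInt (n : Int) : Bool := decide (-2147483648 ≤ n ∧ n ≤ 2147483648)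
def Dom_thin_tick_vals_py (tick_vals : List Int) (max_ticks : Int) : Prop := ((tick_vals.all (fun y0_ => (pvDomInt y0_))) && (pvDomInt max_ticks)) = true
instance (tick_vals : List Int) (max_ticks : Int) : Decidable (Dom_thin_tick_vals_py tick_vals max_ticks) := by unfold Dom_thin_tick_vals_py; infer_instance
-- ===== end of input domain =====

-- B replaces A's per-stride candidate-list construction by an O(1) arithmetic count per stride
-- and builds the chosen list once by a single slice.

-- ===== PORT A =====
-- kept = [tick_vals[0]] + [tick_vals[i] for i in range(stride, n-1, stride)] + [tick_vals[-1]]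
-- (only evaluated with n = len(tick_vals) ≥ 2 and stride ≥ 1, so every index is in range and pyGetD is exact)
def pvKeptA (tv : List Int) (n stride : Int) : List Int :=
  [PySem.List.pyGetD tv 0 0] ++ (PySem.List.pyRange stride (n - 1) stride).map (fun i => PySem.List.pyGetD tv i 0)
    ++ [PySem.List.pyGetD tv (-1) 0]

-- the inner `for base in [1, 2, 5]` with its early return
def pvBasesA (tv : List Int) (n mt magnitude : Int) : List Int → Option (List Int)
  | [] => none
  | b :: bs =>
      let kept := pvKeptA tv n (b * magnitude)
      if (kept.length : Int) ≤ mt then some kept else pvBasesA tv n mt magnitude bs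

-- the `while magnitude < n` loop; fuel n+1 always suffices (magnitude = 10^k ≥ k+1 after k rounds)
def pvLoopA (tv : List Int) (n mt : Int) : Int → Nat → List Int
  | _, 0 => [PySem.List.pyGetD tv 0 0, PySem.List.pyGetD tv (-1) 0]
  | magnitude, fuel + 1 =>
      if magnitude < n then
        match pvBasesA tv n mt magnitude [1, 2, 5] with
        | some kept => kept
        | none => pvLoopA tv n mt (magnitude * 10) fuel
      else [PySem.List.pyGetD tv 0 0, PySem.List.pyGetD tv (-1) 0]

def thin_tick_vals_py (tick_vals : List Int) (max_ticks : Int) : Option (List Int) :=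
  if max_ticks ≤ 0 ∨ (tick_vals.length : Int) ≤ max_ticks then none
  else some (pvLoopA tick_vals (tick_vals.length : Int) max_ticks 1 (tick_vals.length + 1))

-- ===== PORT B =====
-- inner `for base in (1, 2, 5)` of _pick_stride: arithmetic count test only
def pvBasesB (n mt magnitude : Int) : List Int → Option Int
  | [] => none
  | b :: bs =>
      let stride := b * magnitude
      if PySem.Int.floordiv (n - 2) stride + 2 ≤ mt then some stride else pvBasesB n mt magnitude bs

-- _pick_stride's `while magnitude < n`; same fuel bound as A's loop
def pvPickB (n mt : Int) : Int → Nat → Option Int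
  | _, 0 => none
  | magnitude, fuel + 1 =>
      if magnitude < n then
        match pvBasesB n mt magnitude [1, 2, 5] with
        | some s => some s
        | none => pvPickB n mt (magnitude * 10) fuel
      else none

-- [tick_vals[0], *tick_vals[stride:n-1:stride], tick_vals[-1]] — slice? is total here (stride ≠ 0)
def thin_tick_vals_py_alt (tick_vals : List Int) (max_ticks : Int) : Option (List Int) :=
  if max_ticks ≤ 0 ∨ (tick_vals.length : Int) ≤ max_ticks then none
  else
    let n : Int := tick_vals.length
    match pvPickB n max_ticks 1 (tick_vals.length + 1) with
    | none => some [PySem.List.pyGetD tick_vals 0 0, PySem.List.pyGetD tick_vals (-1) 0]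
    | some stride =>
        some ([PySem.List.pyGetD tick_vals 0 0]
          ++ (PySem.List.slice? tick_vals (some stride) (some (n - 1)) stride).getD []
          ++ [PySem.List.pyGetD tick_vals (-1) 0])

-- ===== PRECONDITION & SPEC =====
def Spec_thin_tick_vals_py (tick_vals : List Int) (max_ticks : Int) (out : Option (List Int)) : Prop := out = thin_tick_vals_py_alt tick_vals max_ticks
instance (tick_vals : List Int) (max_ticks : Int) (out : Option (List Int)) : Decidable (Spec_thin_tick_vals_py tick_vals max_ticks out) := by unfold Spec_thin_tick_vals_py; infer_instance

-- ===== CLAIM (what is proved, stated in full; the proofs are below) =====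
def Claim_equal_thin_tick_vals_py : Prop := ∀ (tick_vals : List Int) (max_ticks : Int), Dom_thin_tick_vals_py tick_vals max_ticks → Spec_thin_tick_vals_py tick_vals max_ticks (thin_tick_vals_py tick_vals max_ticks)

-- ===== LEMMAS AND PROOFS =====

-- length of range(stride, n-1, stride) is (n-2)//stride
theorem pvRange_len (n stride : Int) (hs : 0 < stride) (hn : 2 ≤ n) :
    ((PySem.List.pyRange stride (n - 1) stride).length : Int) = PySem.Int.floordiv (n - 2) stride := by
  have hfd : PySem.Int.floordiv (n - 2) stride = (n - 2) / stride := by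
    have := @PySem.Int.floordiv_eq_ediv_of_pos (n-2) stride
    exact this hs
  rw [PySem.List.pyRange_of_pos _ _ hs, hfd, List.length_map, List.length_range]
  by_cases h : stride < n - 1
  · rw [if_pos h]
    have he : n - 1 - stride + stride - 1 = n - 2 := by ring
    rw [he, Int.toNat_of_nonneg (Int.ediv_nonneg (by omega) (by omega))]
  · rw [if_neg h, Int.ediv_eq_zero_of_lt (by omega) (by omega)]
    simp

theorem pvFilterMap_eq_map {α β : Type} (l : List α) (f : α → Option β) (g : α → β)
    (h : ∀ x ∈ l, f x = some (g x)) : l.filterMap f = l.map g := by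
  induction l with
  | nil => rfl
  | cons a l ih =>
      rw [List.filterMap_cons, h a (by simp), List.map_cons, ih (fun x hx => h x (by simp [hx]))]

-- B's slice equals A's comprehension over range(stride, n-1, stride)
theorem pvSlice_eq (tv : List Int) (stride : Int) (hs : 0 < stride) :
    (PySem.List.slice? tv (some stride) (some ((tv.length : Int) - 1)) stride).getD []
      = (PySem.List.pyRange stride ((tv.length : Int) - 1) stride).map (fun i => PySem.List.pyGetD tv i 0) := by
  unfold PySem.List.slice? PySem.List.sliceIndices
  rw [if_neg (by omega : ¬ stride = 0)]
  simp only [if_neg (by omega : ¬ stride < 0), Option.getD_some, if_pos hs]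
  rw [PySem.List.pyRange_of_pos _ _ hs, List.map_map]
  by_cases hN0 : tv.length = 0
  · simp [hN0]
    omega
  · have h1 : ¬ ((tv.length : Int) - 1 < 0) := by omega
    rw [if_neg h1, min_eq_left (by omega : (tv.length : Int) - 1 ≤ (tv.length : Int))]
    by_cases h2 : stride ≤ (tv.length : Int)
    · rw [min_eq_left h2]
      have hnum : (tv.length : Int) - 1 - stride + stride - 1 = (tv.length : Int) - 2 := by ring
      rw [hnum]
      apply pvFilterMap_eq_map
      intro k hk
      simp only [List.mem_range] at hk
      split_ifs at hk with hlt
      · have hk' : (k : Int) + 1 ≤ ((tv.length : Int) - 2) / stride := by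
          have hnn : (0:Int) ≤ ((tv.length : Int) - 2) / stride :=
            Int.ediv_nonneg (by omega) (by omega)
          have htn := Int.toNat_of_nonneg hnn
          omega
        have hmul : stride * ((k : Int) + 1) ≤ stride * (((tv.length : Int) - 2) / stride) :=
          mul_le_mul_of_nonneg_left hk' (by omega)
        have hdl : stride * (((tv.length : Int) - 2) / stride) ≤ (tv.length : Int) - 2 := by
          rw [mul_comm]; exact Int.ediv_mul_le _ (by omega)
        have hidx : stride + stride * (k : Int) ≤ (tv.length : Int) - 2 := by nlinarith
        have hge : 0 ≤ stride + stride * (k : Int) := by positivity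
        have hlen : (stride + stride * (k : Int)).toNat < tv.length := by omega
        simp only [Function.comp_apply]
        rw [List.getElem?_eq_getElem hlen,
            PySem.List.pyGetD_eq_getElem tv 0 hge (by omega)]
      · omega
    · rw [min_eq_right (by omega : (tv.length : Int) ≤ stride)]
      rw [if_neg (by omega), if_neg (by omega)]
      simp

-- length of A's candidate list is B's arithmetic count
theorem pvKeptA_length (tv : List Int) (n stride : Int) (hs : 0 < stride) (hn : 2 ≤ n) :
    ((pvKeptA tv n stride).length : Int) = PySem.Int.floordiv (n - 2) stride + 2 := by
  simp only [pvKeptA, List.length_append, List.length_map, List.length_cons, List.length_nil]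
  have := pvRange_len n stride hs hn
  omega

-- the two loops align round for round: A returns the kept list of the stride B picks
theorem pvLoop_eq (tv : List Int) (mt : Int) (fuel : Nat) (magnitude : Int) (hm : 0 < magnitude)
    (hn : 2 ≤ (tv.length : Int)) :
    pvLoopA tv (tv.length : Int) mt magnitude fuel =
      (match pvPickB (tv.length : Int) mt magnitude fuel with
        | none => [PySem.List.pyGetD tv 0 0, PySem.List.pyGetD tv (-1) 0]
        | some stride =>
            [PySem.List.pyGetD tv 0 0]
              ++ (PySem.List.slice? tv (some stride) (some ((tv.length : Int) - 1)) stride).getD []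
              ++ [PySem.List.pyGetD tv (-1) 0]) := by
  induction fuel generalizing magnitude with
  | zero => simp [pvLoopA, pvPickB]
  | succ fuel ih =>
      simp only [pvLoopA, pvPickB]
      by_cases hlt : magnitude < (tv.length : Int)
      · rw [if_pos hlt, if_pos hlt]
        have hkept : ∀ b : Int, 0 < b →
            pvKeptA tv (tv.length : Int) (b * magnitude)
              = [PySem.List.pyGetD tv 0 0]
                ++ (PySem.List.slice? tv (some (b * magnitude)) (some ((tv.length : Int) - 1)) (b * magnitude)).getD []
                ++ [PySem.List.pyGetD tv (-1) 0] := by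
          intro b hb
          rw [pvSlice_eq tv (b * magnitude) (by positivity)]
          rfl
        simp only [pvBasesA, pvBasesB]
        rw [pvKeptA_length tv _ _ (by positivity : (0:Int) < 1 * magnitude) hn,
            pvKeptA_length tv _ _ (by positivity : (0:Int) < 2 * magnitude) hn,
            pvKeptA_length tv _ _ (by positivity : (0:Int) < 5 * magnitude) hn]
        split_ifs with h1 h2 h3
        · exact hkept 1 (by norm_num)
        · exact hkept 2 (by norm_num)
        · exact hkept 5 (by norm_num)
        · exact ih (magnitude * 10) (by positivity)
      · rw [if_neg hlt, if_neg hlt]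

-- ===== VERDICT (by name: the statement is the Claim_ definition above) =====
theorem thin_tick_vals_py_spec : Claim_equal_thin_tick_vals_py := by
  intro tv mt _
  unfold Spec_thin_tick_vals_py thin_tick_vals_py thin_tick_vals_py_alt
  by_cases h : mt ≤ 0 ∨ (tv.length : Int) ≤ mt
  · simp [h]
  · have hn : 2 ≤ (tv.length : Int) := by
      rw [not_or, not_le, not_le] at h
      omega
    simp only [if_neg h]
    rw [pvLoop_eq tv mt (tv.length + 1) 1 (by omega) hn]
    cases pvPickB (tv.length : Int) mt 1 (tv.length + 1) <;> simp
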